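-- pv_equiv track=rewrite | github.com/Alesyya/tms_qap14_Lukashevich | HW4,5/while.py | count_and_sum_digits
-- ===== SOURCE A (Python) =====
-- def count_and_sum_digits(n):
--     """ #3 Возвращает количество и сумму цифр числа, используя операции деления нацело и взятия
-- остатка от деления """
--     sum1 = 0
--     count = 0
--     while n > 0:
--         num = n % 10
--         sum1 += num
--         n = n // 10
--         count += 1
--     return count, sum1
-- ===== SOURCE B (Python) =====
-- def count_and_sum_digits(n):
--     """Count and sum the digits of n via its decimal string representation."""
--     if n <= 0:
--         return (0, 0)
--     s = str(n)
--     return len(s), sum(int(c) for c in s)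
-- ===== Notes on version B (the rewrite author's own statement) =====
-- stated objective: idiomatic
-- what changed: Replaces the mod/div while-loop with the standard idiom of traversing the decimal string representation: len(str(n)) gives the count and a comprehension sums int(c) per character.
import Mathlib
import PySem

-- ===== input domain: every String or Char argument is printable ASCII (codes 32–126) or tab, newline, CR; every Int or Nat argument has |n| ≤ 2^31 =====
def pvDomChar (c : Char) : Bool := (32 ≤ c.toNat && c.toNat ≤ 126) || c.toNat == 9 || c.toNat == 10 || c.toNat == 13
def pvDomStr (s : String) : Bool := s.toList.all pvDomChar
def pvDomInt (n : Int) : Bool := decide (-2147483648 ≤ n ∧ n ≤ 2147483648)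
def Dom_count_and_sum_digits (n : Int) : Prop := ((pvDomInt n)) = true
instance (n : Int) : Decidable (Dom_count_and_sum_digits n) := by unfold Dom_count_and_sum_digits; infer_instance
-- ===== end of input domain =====

-- B replaces A's mod/div extraction loop with the idiomatic traversal of str(n):
-- len gives the count, a per-character sum of int(c) gives the digit sum (same cost, no speed claim).

-- ===== PORT A =====
-- the while-loop of A, recursing on the same state (n, sum1, count)
def pvLoop (n sum1 count : Int) : Int × Int :=
  if h : 0 < n then
    pvLoop (PySem.Int.floordiv n 10) (sum1 + PySem.Int.mod n 10) (count + 1)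
  else (count, sum1)
termination_by n.toNat
decreasing_by
  rw [PySem.Int.floordiv_eq_ediv_of_pos (by norm_num)]
  omega

def count_and_sum_digits (n : Int) : Int × Int := pvLoop n 0 0

-- ===== PORT B =====
-- int(c) is ported as (PySem.Int.ofChars? [c]).getD 0: exact here, since every character of
-- str(n) for n > 0 is a decimal digit, on which int() returns (never raises).
def count_and_sum_digits_alt (n : Int) : Int × Int :=
  if n ≤ 0 then (0, 0)
  else
    let s := PySem.Int.toStr n
    (PySem.Str.len s, (s.toList.map (fun c => (PySem.Int.ofChars? [c]).getD 0)).sum)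

-- ===== PRECONDITION & SPEC =====
def Spec_count_and_sum_digits (n : Int) (out : Int × Int) : Prop := out = count_and_sum_digits_alt n
instance (n : Int) (out : Int × Int) : Decidable (Spec_count_and_sum_digits n out) := by unfold Spec_count_and_sum_digits; infer_instance

-- ===== CLAIM (what is proved, stated in full; the proofs are below) =====
def Claim_equal_count_and_sum_digits : Prop := ∀ (n : Int), Dom_count_and_sum_digits n → Spec_count_and_sum_digits n (count_and_sum_digits n)

-- ===== LEMMAS AND PROOFS =====

-- value of int() on a single digit character
theorem pv_dval_digitChar (d : Nat) (h : d < 10) :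
    (PySem.Int.ofChars? [Nat.digitChar d]).getD 0 = (d : Int) := by
  interval_cases d <;> decide

-- Nat.toDigitsCore, fully fueled, produces the base-10 digits (most significant first)
theorem pv_toDigitsCore_eq (f : Nat) : ∀ (n : Nat) (ds : List Char), 0 < n → n < f →
    Nat.toDigitsCore 10 f n ds = (Nat.digits 10 n).reverse.map Nat.digitChar ++ ds := by
  induction f with
  | zero => intro n ds h1 h2; omega
  | succ f ih =>
    intro n ds h1 h2
    rw [Nat.toDigitsCore]
    by_cases h0 : n / 10 = 0
    · simp [h0, Nat.digits_def' (by norm_num : 1 < 10) h1]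
    · simp only [h0, if_false]
      rw [ih (n / 10) _ (by omega) (by omega),
        Nat.digits_def' (by norm_num : 1 < 10) h1]
      simp

theorem pv_toDigits_eq (n : Nat) (h : 0 < n) :
    Nat.toDigits 10 n = (Nat.digits 10 n).reverse.map Nat.digitChar := by
  rw [Nat.toDigits, pv_toDigitsCore_eq (n + 1) n [] h (by omega)]
  simp

-- A's loop computes length and sum of the base-10 digit list
theorem pv_loop_eq (m : Nat) : ∀ (s c : Int), 0 < m →
    pvLoop (m : Int) s c =
      (c + ((Nat.digits 10 m).length : Int), s + ((Nat.digits 10 m).sum : Int)) := by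
  induction m using Nat.strong_induction_on with
  | _ m ih =>
    intro s c hm
    have hpos : (0 : Int) < (m : Int) := by exact_mod_cast hm
    have hdiv : PySem.Int.floordiv (m : Int) 10 = ((m / 10 : Nat) : Int) := by
      exact_mod_cast PySem.Int.floordiv_natCast m 10
    have hmod : PySem.Int.mod (m : Int) 10 = ((m % 10 : Nat) : Int) := by
      exact_mod_cast PySem.Int.mod_natCast m 10
    rw [pvLoop, dif_pos hpos, hdiv, hmod, Nat.digits_def' (by norm_num : 1 < 10) hm]
    by_cases h0 : m / 10 = 0
    · rw [h0]
      rw [pvLoop, dif_neg (by norm_num)]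
      simp
    · rw [ih (m / 10) (by omega) _ _ (by omega)]
      simp
      constructor <;> ring

-- B computes length and sum of the base-10 digit list
theorem pv_alt_eq (m : Nat) (h : 0 < m) :
    count_and_sum_digits_alt (m : Int) =
      (((Nat.digits 10 m).length : Int), ((Nat.digits 10 m).sum : Int)) := by
  have hpos : ¬ ((m : Int) ≤ 0) := by omega
  unfold count_and_sum_digits_alt
  rw [if_neg hpos]
  have htc : PySem.Int.toChars (m : Int) = Nat.toDigits 10 m := by
    simp [PySem.Int.toChars]
  have hl : (PySem.Int.toStr (m : Int)).toList = Nat.toDigits 10 m := by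
    rw [PySem.Int.toList_toStr, htc]
  simp only []
  rw [PySem.Str.len_eq, hl, pv_toDigits_eq m h]
  refine Prod.ext ?_ ?_
  · simp
  · simp only [List.map_reverse, List.map_map, List.sum_reverse, Function.comp_def]
    rw [List.map_congr_left (g := fun d : Nat => (d : Int))
      (fun d hd => pv_dval_digitChar d (Nat.digits_lt_base (by norm_num) hd))]
    simp

-- ===== VERDICT (by name: the statement is the Claim_ definition above) =====
theorem count_and_sum_digits_spec : Claim_equal_count_and_sum_digits := by
  intro n _
  unfold Spec_count_and_sum_digits count_and_sum_digits
  by_cases h : n ≤ 0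
  · rw [pvLoop, dif_neg (by omega)]
    unfold count_and_sum_digits_alt
    rw [if_pos h]
  · have hm : 0 < n.toNat := by omega
    have hn : n = (n.toNat : Int) := by omega
    rw [hn, pv_loop_eq n.toNat 0 0 hm, pv_alt_eq n.toNat hm]
    simp
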